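-- pv_equiv track=rewrite | github.com/kc0bfv/AdventOfCode | 2018/day5.py | elim_pairs
-- ===== SOURCE A (Python) =====
-- import itertools as it
--
-- def elim_pairs(indat):
--     pairs = it.chain((chr(i)+chr(i-32) for i in range(ord("a"),ord("z")+1)),
--                      (chr(i-32)+chr(i) for i in range(ord("a"),ord("z")+1)))
--     finds = (indat.find(p) for p in pairs)
--     goodfinds = (i for i in finds if i != -1)
--     try:
--         find = next(goodfinds)
--         return indat[:find]+indat[find+2:]
--     except StopIteration as e:
--         return indat
-- ===== SOURCE B (Python) =====
-- def elim_pairs(indat):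
--     first = {}
--     for i in range(len(indat) - 1):
--         a, b = indat[i], indat[i + 1]
--         if 'a' <= a <= 'z' and ord(b) == ord(a) - 32:
--             r = ord(a) - 97
--         elif 'A' <= a <= 'Z' and ord(b) == ord(a) + 32:
--             r = 26 + ord(a) - 65
--         else:
--             continue
--         if r not in first:
--             first[r] = i
--     if not first:
--         return indat
--     i = first[min(first)]
--     return indat[:i] + indat[i + 2:]
-- ===== Notes on version B (the rewrite author's own statement) =====
-- stated objective: alternative
-- what changed: A scans the string up to 52 times (one .find per reacting pair generated in rank order); B makes a single indexed pass recording the first index of each reacting pair keyed by its rank in a dict, then removes at the smallest present rank. It trades repeated C-level substring scans for one explicit pass, so it is not measurably faster in CPython.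
import Mathlib
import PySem

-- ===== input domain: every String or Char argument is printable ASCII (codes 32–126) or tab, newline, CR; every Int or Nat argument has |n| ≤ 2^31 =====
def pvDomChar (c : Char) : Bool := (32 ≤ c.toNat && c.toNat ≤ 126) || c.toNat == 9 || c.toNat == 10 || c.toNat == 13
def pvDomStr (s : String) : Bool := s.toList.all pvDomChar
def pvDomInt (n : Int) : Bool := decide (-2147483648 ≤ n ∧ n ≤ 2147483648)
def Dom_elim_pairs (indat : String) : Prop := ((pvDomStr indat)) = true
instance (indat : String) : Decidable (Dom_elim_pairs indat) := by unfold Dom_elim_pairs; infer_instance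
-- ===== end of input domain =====

-- B replaces A's up-to-52 repeated .find scans by one indexed pass that records the first index of
-- each reacting pair keyed by its rank in a dict, then removes at the smallest present rank
-- (a different algorithm of similar measured cost).

-- ===== PORT A =====
-- the chained generators of pair strings "aA".."zZ" then "Aa".."Zz"
def pairsA : List String :=
  (PySem.List.pyRange 97 123 1).map
      (fun i => String.ofList [Char.ofNat i.toNat, Char.ofNat (i.toNat - 32)]) ++
  (PySem.List.pyRange 97 123 1).map
      (fun i => String.ofList [Char.ofNat (i.toNat - 32), Char.ofNat i.toNat])

-- next(goodfinds): first pair whose find is ≠ -1; StopIteration → return indat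
def elimPairsGo (indat : String) : List String → String
  | [] => indat
  | p :: rest =>
    let f := PySem.Str.find indat p
    if f ≠ -1 then
      String.ofList (PySem.Chars.slice indat.toList none (some f) ++
                     PySem.Chars.slice indat.toList (some (f + 2)) none)
    else elimPairsGo indat rest

def elim_pairs (indat : String) : String := elimPairsGo indat pairsA

-- ===== PORT B =====
-- rank of a reacting two-char window: aA=0..zZ=25, Aa=26..Zz=51; none = not reacting ("continue")
def bRank? (a b : Char) : Option Int :=
  if 'a' ≤ a ∧ a ≤ 'z' ∧ (b.toNat : Int) = (a.toNat : Int) - 32 then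
    some ((a.toNat : Int) - 97)
  else if 'A' ≤ a ∧ a ≤ 'Z' ∧ (b.toNat : Int) = (a.toNat : Int) + 32 then
    some (26 + (a.toNat : Int) - 65)
  else none

-- one loop iteration: record index i under rank r only if r is not yet present
def bStep (s : List Char) (d : PySem.Dict Int Int) (i : Int) : PySem.Dict Int Int :=
  match bRank? (PySem.List.pyGetD s i ' ') (PySem.List.pyGetD s (i + 1) ' ') with
  | none => d
  | some r => if d.contains r then d else d.insert r i

def elim_pairs_alt (indat : String) : String :=
  let s := indat.toList
  let first := (PySem.List.pyRange 0 ((s.length : Int) - 1) 1).foldl (bStep s) PySem.Dict.empty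
  if first.items.isEmpty then indat
  else
    match PySem.List.min? first.keys (fun x => x) with
    | none => indat  -- unreachable: keys nonempty
    | some m =>
      let i := first.getD m 0
      String.ofList (PySem.Chars.slice s none (some i) ++
                     PySem.Chars.slice s (some (i + 2)) none)

-- ===== PRECONDITION & SPEC =====
def Spec_elim_pairs (indat : String) (out : String) : Prop := out = elim_pairs_alt indat
instance (indat : String) (out : String) : Decidable (Spec_elim_pairs indat out) := by unfold Spec_elim_pairs; infer_instance

-- ===== CLAIM (what is proved, stated in full; the proofs are below) =====
def Claim_equal_elim_pairs : Prop := ∀ (indat : String), Dom_elim_pairs indat → Spec_elim_pairs indat (elim_pairs indat)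

-- ===== LEMMAS AND PROOFS =====

-- the rank-r pair as a list of chars (aA=0..zZ=25, Aa=26..Zz=51)
def pairChars (r : Int) : List Char :=
  if r < 26 then [Char.ofNat (97 + r.toNat), Char.ofNat (65 + r.toNat)]
  else [Char.ofNat (65 + (r.toNat - 26)), Char.ofNat (97 + (r.toNat - 26))]

lemma pairsA_eq : pairsA = (List.range 52).map (fun (r : Nat) => String.ofList (pairChars (r : Int))) := by
  decide

lemma goA_spec (indat : String) (ps : List String) :
    elimPairsGo indat ps =
      match ps.find? (fun p => PySem.Str.find indat p != -1) with
      | none => indat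
      | some p =>
        String.ofList (PySem.Chars.slice indat.toList none (some (PySem.Str.find indat p)) ++
                       PySem.Chars.slice indat.toList (some (PySem.Str.find indat p + 2)) none) := by
  induction ps with
  | nil => rfl
  | cons p rest ih =>
    rw [List.find?_cons]
    by_cases h : PySem.Chars.find indat.toList p.toList = -1
    · have hb : (PySem.Str.find indat p != -1) = false := by simp [h]
      rw [hb]
      simpa [elimPairsGo, h] using ih
    · have hb : (PySem.Str.find indat p != -1) = true := by simp [h]
      rw [hb]
      simp [elimPairsGo, h]

lemma find?_range_eq_some {p : Nat → Bool} {m k : Nat} (hk : k < m) (hpk : p k = true)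
    (hmin : ∀ j, j < k → p j = false) : (List.range m).find? p = some k := by
  induction m with
  | zero => omega
  | succ n ih =>
    rw [List.range_succ, List.find?_append]
    rcases Nat.lt_or_ge k n with h | h
    · rw [ih h]; rfl
    · obtain rfl : k = n := by omega
      have hn : (List.range k).find? p = none := by
        rw [List.find?_eq_none]
        intro j hj
        simp [hmin j (List.mem_range.mp hj)]
      simp [hn, hpk]

lemma find?_range_eq_none {p : Nat → Bool} {m : Nat} (h : ∀ j, j < m → p j = false) :
    (List.range m).find? p = none := by
  rw [List.find?_eq_none]
  intro j hj
  simp [h j (List.mem_range.mp hj)]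

lemma toNat_ofNat_small {n : Nat} (h : n < 1000) : (Char.ofNat n).toNat = n := by
  have : n.isValidChar := by unfold Nat.isValidChar; omega
  simp [Char.ofNat, this]

lemma char_le_iff {a b : Char} : a ≤ b ↔ a.toNat ≤ b.toNat := by
  rw [Char.le_def]; exact ge_iff_le

lemma pair_prefix_iff (s : List Char) (i : Nat) (x y : Char) :
    [x, y] <+: s.drop i ↔ i + 1 < s.length ∧ s[i]? = some x ∧ s[i+1]? = some y := by
  constructor
  · rintro ⟨t, ht⟩
    have hlen : i + 1 < s.length := by
      have := congrArg List.length ht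
      simp [List.length_drop] at this
      omega
    have h1 : i < s.length := by omega
    rw [List.drop_eq_getElem_cons h1, List.drop_eq_getElem_cons hlen] at ht
    injection ht with e1 ht'
    injection ht' with e2 _
    exact ⟨hlen, by simp [List.getElem?_eq_getElem h1, e1], by simp [List.getElem?_eq_getElem hlen, e2]⟩
  · rintro ⟨hlen, hx, hy⟩
    have h1 : i < s.length := by omega
    refine ⟨s.drop (i+2), ?_⟩
    have hx' : s[i] = x := by simpa [List.getElem?_eq_getElem h1] using hx
    have hy' : s[i+1] = y := by simpa [List.getElem?_eq_getElem hlen] using hy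
    rw [List.drop_eq_getElem_cons h1, List.drop_eq_getElem_cons hlen, hx', hy']
    rfl

lemma rank_some_iff (s : List Char) (i : Nat) (r : Int) :
    bRank? (PySem.List.pyGetD s (i : Int) ' ') (PySem.List.pyGetD s ((i : Int) + 1) ' ') = some r ↔
      0 ≤ r ∧ r < 52 ∧ pairChars r <+: s.drop i := by
  rw [show ((i : Int) + 1) = ((i + 1 : Nat) : Int) by push_cast; ring]
  rw [PySem.List.pyGetD_natCast, PySem.List.pyGetD_natCast]
  have h97 : 'a'.toNat = 97 := rfl
  have h122 : 'z'.toNat = 122 := rfl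
  have h65 : 'A'.toNat = 65 := rfl
  have h90 : 'Z'.toNat = 90 := rfl
  constructor
  · intro h
    unfold bRank? at h
    split_ifs at h with h1 h2
    · obtain ⟨hla, hza, hbv⟩ := h1
      rw [char_le_iff, h97] at hla
      rw [char_le_iff, h122] at hza
      injection h with h
      have hbn : (s.getD (i+1) ' ').toNat = (s.getD i ' ').toNat - 32 := by omega
      have hi1 : i + 1 < s.length := by
        by_contra hc
        rw [show s.getD (i+1) ' ' = ' ' from List.getD_eq_default _ _ (by omega),
            show (' '.toNat) = 32 from rfl] at hbn
        omega
      have hi0 : i < s.length := by omega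
      have hgx : s.getD i ' ' = s[i] := List.getD_eq_getElem _ _ hi0
      have hgy : s.getD (i+1) ' ' = s[i+1] := List.getD_eq_getElem _ _ hi1
      refine ⟨by omega, by omega, ?_⟩
      rw [pairChars, if_pos (by omega), pair_prefix_iff]
      refine ⟨hi1, ?_, ?_⟩
      · have e1 : 97 + r.toNat = s[i].toNat := by rw [← hgx]; omega
        rw [e1, Char.ofNat_toNat, List.getElem?_eq_getElem hi0]
      · have e2 : 65 + r.toNat = s[i+1].toNat := by rw [← hgy]; omega
        rw [e2, Char.ofNat_toNat, List.getElem?_eq_getElem hi1]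
    · obtain ⟨hla, hza, hbv⟩ := h2
      rw [char_le_iff, h65] at hla
      rw [char_le_iff, h90] at hza
      injection h with h
      have hbn : (s.getD (i+1) ' ').toNat = (s.getD i ' ').toNat + 32 := by omega
      have hi1 : i + 1 < s.length := by
        by_contra hc
        rw [show s.getD (i+1) ' ' = ' ' from List.getD_eq_default _ _ (by omega),
            show (' '.toNat) = 32 from rfl] at hbn
        omega
      have hi0 : i < s.length := by omega
      have hgx : s.getD i ' ' = s[i] := List.getD_eq_getElem _ _ hi0
      have hgy : s.getD (i+1) ' ' = s[i+1] := List.getD_eq_getElem _ _ hi1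
      refine ⟨by omega, by omega, ?_⟩
      rw [pairChars, if_neg (by omega), pair_prefix_iff]
      refine ⟨hi1, ?_, ?_⟩
      · have e1 : 65 + (r.toNat - 26) = s[i].toNat := by rw [← hgx]; omega
        rw [e1, Char.ofNat_toNat, List.getElem?_eq_getElem hi0]
      · have e2 : 97 + (r.toNat - 26) = s[i+1].toNat := by rw [← hgy]; omega
        rw [e2, Char.ofNat_toNat, List.getElem?_eq_getElem hi1]
  · rintro ⟨hr0, hr52, hpre⟩
    by_cases hc : r < 26
    · rw [pairChars, if_pos hc, pair_prefix_iff] at hpre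
      obtain ⟨hi1, hx, hy⟩ := hpre
      have hi0 : i < s.length := by omega
      rw [List.getElem?_eq_getElem hi0] at hx
      rw [List.getElem?_eq_getElem hi1] at hy
      injection hx with hx
      injection hy with hy
      have hxn : s[i].toNat = 97 + r.toNat := by rw [hx, toNat_ofNat_small (by omega)]
      have hyn : s[i+1].toNat = 65 + r.toNat := by rw [hy, toNat_ofNat_small (by omega)]
      have hgx : s.getD i ' ' = s[i] := List.getD_eq_getElem _ _ hi0
      have hgy : s.getD (i+1) ' ' = s[i+1] := List.getD_eq_getElem _ _ hi1
      unfold bRank?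
      rw [if_pos ⟨by rw [char_le_iff, h97, hgx]; omega,
                  by rw [char_le_iff, h122, hgx]; omega,
                  by rw [hgx, hgy]; omega⟩]
      rw [hgx]
      congr 1
      omega
    · rw [pairChars, if_neg hc, pair_prefix_iff] at hpre
      obtain ⟨hi1, hx, hy⟩ := hpre
      have hi0 : i < s.length := by omega
      rw [List.getElem?_eq_getElem hi0] at hx
      rw [List.getElem?_eq_getElem hi1] at hy
      injection hx with hx
      injection hy with hy
      have hxn : s[i].toNat = 65 + (r.toNat - 26) := by rw [hx, toNat_ofNat_small (by omega)]
      have hyn : s[i+1].toNat = 97 + (r.toNat - 26) := by rw [hy, toNat_ofNat_small (by omega)]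
      have hgx : s.getD i ' ' = s[i] := List.getD_eq_getElem _ _ hi0
      have hgy : s.getD (i+1) ' ' = s[i+1] := List.getD_eq_getElem _ _ hi1
      unfold bRank?
      rw [if_neg (by rintro ⟨c1, -, -⟩; rw [char_le_iff, h97, hgx] at c1; omega)]
      rw [if_pos ⟨by rw [char_le_iff, h65, hgx]; omega,
                  by rw [char_le_iff, h90, hgx]; omega,
                  by rw [hgx, hgy]; omega⟩]
      rw [hgx]
      congr 1
      omega

lemma dict_inv (s : List Char) (m : Nat) (r : Int) :
    (((List.range m).map (Int.ofNat)).foldl (bStep s) PySem.Dict.empty).get? r =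
      ((List.range m).find?
        (fun (i : Nat) => bRank? (PySem.List.pyGetD s (i : Int) ' ') (PySem.List.pyGetD s ((i : Int) + 1) ' ') == some r)).map
        (Int.ofNat) := by
  induction m generalizing r with
  | zero => simp [PySem.Dict.get?_empty]
  | succ n ih =>
    rw [List.range_succ, List.map_append, List.foldl_append, List.find?_append]
    simp only [List.map_cons, List.map_nil, List.foldl_cons, List.foldl_nil]
    rw [bStep]
    have hofn : ((Int.ofNat n) + 1) = ((n : Int) + 1) := rfl
    rw [hofn]
    cases hrk : bRank? (PySem.List.pyGetD s (n : Int) ' ') (PySem.List.pyGetD s ((n : Int) + 1) ' ') with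
    | none =>
      have hsingle : (List.find? (fun (i : Nat) => bRank? (PySem.List.pyGetD s (i : Int) ' ') (PySem.List.pyGetD s ((i : Int) + 1) ' ') == some r) [n]) = none := by
        rw [List.find?_singleton, if_neg]
        simp only [hrk]
        simp
      rw [hsingle, ih]
      cases (List.range n).find? (fun (i : Nat) => bRank? (PySem.List.pyGetD s (i : Int) ' ') (PySem.List.pyGetD s ((i : Int) + 1) ' ') == some r) <;> rfl
    | some r0 =>
      simp only [show (Int.ofNat n : Int) = (n : Int) from rfl]
      by_cases hrr : r = r0
      · subst hrr
        have hsingle : (List.find? (fun (i : Nat) => bRank? (PySem.List.pyGetD s (i : Int) ' ') (PySem.List.pyGetD s ((i : Int) + 1) ' ') == some r) [n]) = some n := by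
          rw [List.find?_singleton, if_pos]
          simp only [hrk]
          simp
        rw [hsingle]
        by_cases hc : (((List.range n).map (Int.ofNat)).foldl (bStep s) PySem.Dict.empty).contains r
        · rw [if_pos hc, ih]
          have hsome : (((List.range n).map (Int.ofNat)).foldl (bStep s) PySem.Dict.empty).get? r ≠ none := by
            rw [PySem.Dict.contains_eq_isSome_get?] at hc
            exact Option.isSome_iff_ne_none.mp hc
          rw [ih] at hsome
          cases hfind : (List.range n).find? (fun (i : Nat) => bRank? (PySem.List.pyGetD s (i : Int) ' ') (PySem.List.pyGetD s ((i : Int) + 1) ' ') == some r) with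
          | none => rw [hfind] at hsome; simp at hsome
          | some k => rfl
        · rw [if_neg hc, PySem.Dict.get?_insert_self]
          have hnone : (((List.range n).map (Int.ofNat)).foldl (bStep s) PySem.Dict.empty).get? r = none := by
            rw [PySem.Dict.contains_eq_isSome_get?] at hc
            simpa using hc
          rw [ih] at hnone
          cases hfind : (List.range n).find? (fun (i : Nat) => bRank? (PySem.List.pyGetD s (i : Int) ' ') (PySem.List.pyGetD s ((i : Int) + 1) ' ') == some r) with
          | none => rfl
          | some k => rw [hfind] at hnone; simp at hnone
      · have hsingle : (List.find? (fun (i : Nat) => bRank? (PySem.List.pyGetD s (i : Int) ' ') (PySem.List.pyGetD s ((i : Int) + 1) ' ') == some r) [n]) = none := by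
          rw [List.find?_singleton, if_neg]
          simp only [hrk]
          simp [beq_iff_eq]
          exact fun h => hrr h.symm
        rw [hsingle]
        by_cases hc : (((List.range n).map (Int.ofNat)).foldl (bStep s) PySem.Dict.empty).contains r0
        · rw [if_pos hc, ih]
          cases (List.range n).find? (fun (i : Nat) => bRank? (PySem.List.pyGetD s (i : Int) ' ') (PySem.List.pyGetD s ((i : Int) + 1) ' ') == some r) <;> rfl
        · rw [if_neg hc, PySem.Dict.get?_insert_of_ne _ _ hrr, ih]
          cases (List.range n).find? (fun (i : Nat) => bRank? (PySem.List.pyGetD s (i : Int) ' ') (PySem.List.pyGetD s ((i : Int) + 1) ' ') == some r) <;> rfl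

-- the final dictionary of B, characterized through Chars.find
lemma dict_find (s : List Char) (r : Int) :
    ((PySem.List.pyRange 0 ((s.length : Int) - 1) 1).foldl (bStep s) PySem.Dict.empty).get? r =
      if 0 ≤ r ∧ r < 52 ∧ PySem.Chars.find s (pairChars r) ≠ -1
      then some (PySem.Chars.find s (pairChars r)) else none := by
  have hrange : PySem.List.pyRange 0 ((s.length : Int) - 1) 1 = (List.range (s.length - 1)).map (Int.ofNat) := by
    rw [PySem.List.pyRange_one]
    have : (((s.length : Int) - 1) - 0).toNat = s.length - 1 := by omega
    rw [this]
    apply List.map_congr_left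
    intro k _
    simp
  rw [hrange, dict_inv]
  by_cases hb : 0 ≤ r ∧ r < 52
  · by_cases hF : PySem.Chars.find s (pairChars r) = -1
    · rw [if_neg (by tauto)]
      rw [find?_range_eq_none]
      · rfl
      · intro j hj
        rw [beq_eq_false_iff_ne]
        intro hcon
        rw [rank_some_iff] at hcon
        rw [PySem.Chars.find_eq_neg_one_iff] at hF
        exact hF ((hcon.2.2).isInfix.trans (List.drop_suffix j s).isInfix)
    · rw [if_pos ⟨hb.1, hb.2, hF⟩]
      have h0 : 0 ≤ PySem.Chars.find s (pairChars r) := by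
        have := PySem.Chars.neg_one_le_find (s := s) (sub := pairChars r)
        omega
      obtain ⟨hpre, hmin⟩ := PySem.Chars.find_spec (s := s) (sub := pairChars r) h0
      set k := (PySem.Chars.find s (pairChars r)).toNat with hk
      have hk1 : k + 1 < s.length := by
        obtain ⟨t, ht⟩ := hpre
        have := congrArg List.length ht
        simp [List.length_drop, pairChars] at this
        split_ifs at this <;> simp at this <;> omega
      rw [find?_range_eq_some (k := k) (by omega) ?_ ?_]
      · simp [hk, Int.toNat_of_nonneg h0]
      · rw [beq_iff_eq, rank_some_iff]
        exact ⟨hb.1, hb.2, hpre⟩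
      · intro j hj
        rw [beq_eq_false_iff_ne]
        intro hcon
        rw [rank_some_iff] at hcon
        exact hmin j hj hcon.2.2
  · rw [if_neg (by tauto)]
    rw [find?_range_eq_none]
    · rfl
    · intro j hj
      rw [beq_eq_false_iff_ne]
      intro hcon
      rw [rank_some_iff] at hcon
      exact hb ⟨hcon.1, hcon.2.1⟩

-- ===== VERDICT (by name: the statement is the Claim_ definition above) =====
theorem elim_pairs_spec : Claim_equal_elim_pairs := by
  intro indat _
  unfold Spec_elim_pairs
  rw [elim_pairs, goA_spec, pairsA_eq, List.find?_map]
  rw [elim_pairs_alt]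
  simp only [Function.comp_def, PySem.Str.find_eq, String.toList_ofList]
  set s := indat.toList with hs
  set D := (PySem.List.pyRange 0 ((s.length : Int) - 1) 1).foldl (bStep s) PySem.Dict.empty with hD
  by_cases hE : ∀ r : Int, 0 ≤ r → r < 52 → PySem.Chars.find s (pairChars r) = -1
  · -- nothing reacts: both return indat
    have hfind : (List.range 52).find? (fun (r : Nat) => PySem.Chars.find s (pairChars (r : Int)) != -1) = none := by
      apply find?_range_eq_none
      intro j hj
      simp [hE (j : Int) (by omega) (by exact_mod_cast hj)]
    rw [hfind]
    have hkeys : D.keys = [] := by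
      rw [List.eq_nil_iff_forall_not_mem]
      intro r hr
      have hnone : D.get? r = none := by
        rw [hD, dict_find, if_neg]
        rintro ⟨h1, h2, h3⟩
        exact h3 (hE r h1 h2)
      exact ((PySem.Dict.get?_eq_none_iff_not_mem_keys _ _).mp hnone) hr
    have hitems : D.items = [] := by
      have : D.items.map Prod.fst = [] := hkeys
      exact List.map_eq_nil_iff.mp this
    rw [hitems]
    rfl
  · push Not at hE
    obtain ⟨r0, hr00, hr052, hF0⟩ := hE
    have hr0mem : r0 ∈ D.keys := by
      by_contra hmem
      have hnone : D.get? r0 = none := (PySem.Dict.get?_eq_none_iff_not_mem_keys _ _).mpr hmem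
      rw [hD, dict_find, if_pos ⟨hr00, hr052, hF0⟩] at hnone
      exact absurd hnone (Option.some_ne_none _)
    have hkeysne : D.keys ≠ [] := fun h => by rw [h] at hr0mem; exact absurd hr0mem (List.not_mem_nil)
    have hitemsne : ¬ D.items.isEmpty = true := by
      intro h
      rw [List.isEmpty_iff] at h
      apply hkeysne
      show D.items.map Prod.fst = []
      rw [h]; rfl
    rw [if_neg hitemsne]
    cases hmin : PySem.List.min? D.keys (fun x => x) with
    | none => exact absurd (((PySem.List.min?_eq_none_iff _ _).mp hmin)) hkeysne
    | some mk =>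
      have hmkmem : mk ∈ D.keys := PySem.List.min?_mem hmin
      have hmkmin : ∀ y ∈ D.keys, mk ≤ y := PySem.List.min?_isMin hmin
      have hmkget : D.get? mk ≠ none := by
        intro hnone
        exact ((PySem.Dict.get?_eq_none_iff_not_mem_keys _ _).mp hnone) hmkmem
      have hmkcond : 0 ≤ mk ∧ mk < 52 ∧ PySem.Chars.find s (pairChars mk) ≠ -1 := by
        by_contra hc
        rw [hD, dict_find, if_neg hc] at hmkget
        exact hmkget rfl
      obtain ⟨hmk0, hmk52, hFmk⟩ := hmkcond
      have hmkval : D.get? mk = some (PySem.Chars.find s (pairChars mk)) := by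
        rw [hD, dict_find, if_pos ⟨hmk0, hmk52, hFmk⟩]
      have hgetD : D.getD mk 0 = PySem.Chars.find s (pairChars mk) :=
        PySem.Dict.getD_of_get?_eq_some _ _ hmkval
      have hcast : ((mk.toNat : Int)) = mk := Int.toNat_of_nonneg hmk0
      have hfind : (List.range 52).find? (fun (r : Nat) => PySem.Chars.find s (pairChars (r : Int)) != -1) = some mk.toNat := by
        apply find?_range_eq_some (by omega)
        · simp only [hcast]
          simpa using hFmk
        · intro j hj
          rw [bne_eq_false_iff_eq]
          by_contra hc
          have hjmem : (j : Int) ∈ D.keys := by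
            by_contra hmem
            have hnone : D.get? (j : Int) = none := (PySem.Dict.get?_eq_none_iff_not_mem_keys _ _).mpr hmem
            rw [hD, dict_find, if_pos ⟨by omega, by exact_mod_cast (show j < 52 by omega), hc⟩] at hnone
            exact absurd hnone (Option.some_ne_none _)
          have := hmkmin _ hjmem
          omega
      rw [hfind]
      simp only [Option.map_some]
      rw [hgetD, hcast, String.toList_ofList]
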